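-- pv_equiv track=rewrite | github.com/vraravam/api_governance_agent | src/utils/violation_utils.py | group_by_file
-- ===== SOURCE A (Python) =====
-- from typing import Dict, List
--
-- def group_by_file(violations: List[Dict]) -> Dict[str, List[Dict]]:
--     """
--     Group violations by file path.
--
--     Args:
--       violations: List of violations
--
--     Returns:
--       Dictionary mapping file path to violations
--     """
--     groups = {}
--
--     for v in violations:
--         file_path = v.get("file", v.get("source", "unknown"))
--         if file_path not in groups:
--             groups[file_path] = []
--         groups[file_path].append(v)
--
--     return groups
-- ===== SOURCE B (Python) =====
-- from typing import Dict, List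
--
--
-- def group_by_file(violations: List[Dict]) -> Dict[str, List[Dict]]:
--     """Group violations by file path: distinct keys in first-seen order, then one filter per key."""
--     def key(v):
--         return v.get("file", v.get("source", "unknown"))
--
--     keys = dict.fromkeys(key(v) for v in violations)
--     return {k: [v for v in violations if key(v) == k] for k in keys}
-- ===== Notes on version B (the rewrite author's own statement) =====
-- stated objective: idiomatic
-- what changed: Replaces A's incremental dict-of-lists building (membership test + in-place append per element) with a declarative two-phase grouping: collect the distinct keys via dict.fromkeys, then build the result by one filtering comprehension per key.
import Mathlib
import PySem

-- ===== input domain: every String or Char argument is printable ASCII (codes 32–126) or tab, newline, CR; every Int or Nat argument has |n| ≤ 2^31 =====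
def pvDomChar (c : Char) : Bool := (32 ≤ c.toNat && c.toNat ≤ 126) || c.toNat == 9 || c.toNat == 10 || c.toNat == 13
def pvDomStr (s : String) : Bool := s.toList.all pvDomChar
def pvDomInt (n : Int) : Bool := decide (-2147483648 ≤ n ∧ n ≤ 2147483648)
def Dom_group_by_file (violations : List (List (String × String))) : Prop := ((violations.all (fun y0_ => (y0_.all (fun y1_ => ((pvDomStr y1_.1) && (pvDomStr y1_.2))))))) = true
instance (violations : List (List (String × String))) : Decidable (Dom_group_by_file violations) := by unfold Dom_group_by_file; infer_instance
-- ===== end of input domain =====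

-- B groups by collecting the distinct keys first and then filtering the list once per key,
-- instead of A's incremental dict-of-lists building; objective: idiomatic, same results.


-- shared helper: v.get("file", v.get("source", "unknown")), the key expression both Pythons use
def pvKeyOf (v : List (String × String)) : String :=
  (PySem.Dict.mk v).getD "file" ((PySem.Dict.mk v).getD "source" "unknown")

-- ===== PORT A =====
def group_by_file (violations : List (List (String × String))) : List (String × List (List (String × String))) :=
  let groups : PySem.Dict String (List (List (String × String))) :=
    violations.foldl (fun groups v =>
      let file_path := pvKeyOf v
      let groups := if groups.contains file_path then groups else groups.insert file_path []
      groups.modify file_path [] (fun l => l ++ [v]))   -- groups[file_path].append(v)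
      PySem.Dict.empty
  groups.items

-- ===== PORT B =====
def group_by_file_alt (violations : List (List (String × String))) : List (String × List (List (String × String))) :=
  let keys := PySem.List.dedup (violations.map pvKeyOf)   -- dict.fromkeys(...)
  keys.map (fun k => (k, violations.filter (fun v => pvKeyOf v == k)))

-- ===== PRECONDITION & SPEC =====
def Spec_group_by_file (violations : List (List (String × String))) (out : List (String × List (List (String × String)))) : Prop := out = group_by_file_alt violations
instance (violations : List (List (String × String))) (out : List (String × List (List (String × String)))) : Decidable (Spec_group_by_file violations out) := by unfold Spec_group_by_file; infer_instance

-- ===== CLAIM (what is proved, stated in full; the proofs are below) =====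
def Claim_equal_group_by_file : Prop := ∀ (violations : List (List (String × String))), Dom_group_by_file violations → Spec_group_by_file violations (group_by_file violations)

-- ===== LEMMAS AND PROOFS =====

-- A's loop body (membership test, possible [] insertion, append) is one modify with default []
theorem pv_step_eq (g : PySem.Dict String (List (List (String × String)))) (v : List (String × String)) :
    (let file_path := pvKeyOf v
     let g' := if g.contains file_path then g else g.insert file_path []
     g'.modify file_path [] (fun l => l ++ [v]))
    = g.modify (pvKeyOf v) [] (fun l => l ++ [v]) := by
  by_cases h : g.contains (pvKeyOf v) = true
  · simp [h]
  · simp only [h, Bool.false_eq_true]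
    simp [PySem.Dict.modify, PySem.Dict.getD_insert_self, PySem.Dict.insert_insert_self,
      PySem.Dict.getD_of_not_contains g [] (by simpa using h)]

theorem group_by_file_eq_modify_fold (violations : List (List (String × String))) :
    group_by_file violations =
      (violations.foldl (fun d v => d.modify (pvKeyOf v) [] (fun l => l ++ [v])) PySem.Dict.empty).items := by
  have hf : (fun (groups : PySem.Dict String (List (List (String × String)))) v =>
      let file_path := pvKeyOf v
      let groups := if groups.contains file_path then groups else groups.insert file_path []
      groups.modify file_path [] (fun l => l ++ [v]))
      = (fun d v => d.modify (pvKeyOf v) [] (fun l => l ++ [v])) := by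
    funext g v
    exact pv_step_eq g v
  unfold group_by_file
  rw [hf]

-- ===== VERDICT (by name: the statement is the Claim_ definition above) =====
theorem group_by_file_spec : Claim_equal_group_by_file := by
  intro violations _
  unfold Spec_group_by_file
  rw [group_by_file_eq_modify_fold]
  set D := violations.foldl (fun d v => d.modify (pvKeyOf v) [] (fun l => l ++ [v])) PySem.Dict.empty with hD
  have hnd : D.keys.Nodup := by
    rw [hD]
    exact PySem.Dict.nodup_keys_foldl_modify_key violations pvKeyOf [] (fun _ v l => l ++ [v]) _ (by simp)
  have hkeys : D.keys = PySem.List.dedup (violations.map pvKeyOf) := by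
    rw [hD, PySem.Dict.keys_foldl_modify_key violations pvKeyOf [] (fun _ v l => l ++ [v])]
    simp [PySem.List.dedup_eq_ofList, PySem.Set.update, PySem.Set.ofList]
  have hgetD : ∀ k, D.getD k [] = violations.filter (fun v => pvKeyOf v == k) := by
    intro k
    have := PySem.Dict.getD_foldl_modify_append
      (violations.map (fun v => (pvKeyOf v, v))) (PySem.Dict.empty) k
    rw [List.foldl_map] at this
    rw [hD]
    simpa [List.filter_map, Function.comp_def, List.map_map] using this
  rw [PySem.Dict.items_eq_map_keys D hnd [], hkeys]
  unfold group_by_file_alt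
  simp only [hgetD]
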